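-- pv_equiv track=rewrite | github.com/stutee274/trojan_detection | test4.py | identify_signal
-- ===== SOURCE A (Python) =====
-- def identify_signal(signal_names, is_trusted):
--     """Improved signal identification with multiple patterns"""
--     target_patterns = {
--         True: ['count_trusted', 'trusted_count', 'count[3:0]'],
--         False: ['count_trojan', 'trojan_count', 'count_troj']
--     }
--
--     for symbol, parts in signal_names.items():
--         parts_str = ' '.join(parts).lower()
--         for pattern in target_patterns[is_trusted]:
--             if pattern in parts_str:
--                 return symbol
--
--     for symbol, parts in signal_names.items():
--         if 'count' in ' '.join(parts).lower():
--             return symbol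
--
--     return None
-- ===== SOURCE B (Python) =====
-- def identify_signal(signal_names, is_trusted):
--     """Single pass: return on first pattern match, remember first 'count' symbol as fallback."""
--     patterns = (['count_trusted', 'trusted_count', 'count[3:0]'] if is_trusted
--                 else ['count_trojan', 'trojan_count', 'count_troj'])
--     fallback = None
--     for symbol, parts in signal_names.items():
--         parts_str = ' '.join(parts).lower()
--         if any(p in parts_str for p in patterns):
--             return symbol
--         if fallback is None and 'count' in parts_str:
--             fallback = symbol
--     return fallback
-- ===== Notes on version B (the rewrite author's own statement) =====
-- stated objective: simpler
-- what changed: Replaces A's two sequential full scans of the dict with a single pass that returns eagerly on a pattern match and records the first 'count' symbol in a fallback variable.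
import Mathlib
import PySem

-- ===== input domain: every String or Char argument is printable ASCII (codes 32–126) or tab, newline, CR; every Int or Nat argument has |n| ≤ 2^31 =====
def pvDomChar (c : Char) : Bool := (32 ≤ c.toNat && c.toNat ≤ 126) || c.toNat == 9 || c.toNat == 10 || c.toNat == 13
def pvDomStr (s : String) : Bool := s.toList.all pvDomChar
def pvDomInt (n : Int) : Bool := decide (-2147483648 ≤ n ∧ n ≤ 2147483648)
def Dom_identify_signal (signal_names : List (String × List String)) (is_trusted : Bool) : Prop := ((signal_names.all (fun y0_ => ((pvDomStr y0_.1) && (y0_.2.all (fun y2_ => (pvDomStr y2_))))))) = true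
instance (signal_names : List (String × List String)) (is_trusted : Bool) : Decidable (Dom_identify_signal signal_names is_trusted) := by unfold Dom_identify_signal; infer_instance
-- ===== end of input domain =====

-- ===== PORT A =====
-- inner loop: 'for pattern in pats: if pattern in parts_str: return symbol'
def pvInnerA (parts_str : String) : List String → Bool
  | [] => false
  | p :: ps => if PySem.Str.isIn p parts_str then true else pvInnerA parts_str ps

-- first loop: first symbol whose joined parts (lowercased) contain a target pattern
def pvLoopA1 (pats : List String) : List (String × List String) → Option String
  | [] => none
  | (symbol, parts) :: rest =>
    let parts_str := PySem.Str.lower (PySem.Str.join " " parts)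
    if pvInnerA parts_str pats then some symbol else pvLoopA1 pats rest

-- second loop: first symbol whose joined parts (lowercased) contain 'count'
def pvLoopA2 : List (String × List String) → Option String
  | [] => none
  | (symbol, parts) :: rest =>
    if PySem.Str.isIn "count" (PySem.Str.lower (PySem.Str.join " " parts)) then some symbol
    else pvLoopA2 rest

def identify_signal (signal_names : List (String × List String)) (is_trusted : Bool) : Option String :=
  let pats := if is_trusted then ["count_trusted", "trusted_count", "count[3:0]"]
              else ["count_trojan", "trojan_count", "count_troj"]
  match pvLoopA1 pats signal_names with
  | some s => some s
  | none => pvLoopA2 signal_names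

-- ===== PORT B =====
-- one pass with a fallback accumulator (first 'count' symbol), eager return on a pattern match
def pvLoopB (pats : List String) (fallback : Option String) : List (String × List String) → Option String
  | [] => fallback
  | (symbol, parts) :: rest =>
    let parts_str := PySem.Str.lower (PySem.Str.join " " parts)
    if pats.any (fun p => PySem.Str.isIn p parts_str) then some symbol
    else pvLoopB pats
      (if fallback.isNone && PySem.Str.isIn "count" parts_str then some symbol else fallback) rest

def identify_signal_alt (signal_names : List (String × List String)) (is_trusted : Bool) : Option String :=
  let pats := if is_trusted then ["count_trusted", "trusted_count", "count[3:0]"]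
              else ["count_trojan", "trojan_count", "count_troj"]
  pvLoopB pats none signal_names

-- ===== PRECONDITION & SPEC =====
def Spec_identify_signal (signal_names : List (String × List String)) (is_trusted : Bool) (out : Option String) : Prop := out = identify_signal_alt signal_names is_trusted
instance (signal_names : List (String × List String)) (is_trusted : Bool) (out : Option String) : Decidable (Spec_identify_signal signal_names is_trusted out) := by unfold Spec_identify_signal; infer_instance

-- ===== CLAIM (what is proved, stated in full; the proofs are below) =====
def Claim_equal_identify_signal : Prop := ∀ (signal_names : List (String × List String)) (is_trusted : Bool), Dom_identify_signal signal_names is_trusted → Spec_identify_signal signal_names is_trusted (identify_signal signal_names is_trusted)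

-- ===== LEMMAS AND PROOFS =====
theorem pvInnerA_eq_any (parts_str : String) (pats : List String) :
    pvInnerA parts_str pats = pats.any (fun p => PySem.Str.isIn p parts_str) := by
  induction pats with
  | nil => rfl
  | cons p ps ih =>
    simp only [pvInnerA, List.any_cons, ih]
    by_cases h : PySem.Str.isIn p parts_str = true <;> simp_all

theorem pvLoopB_eq (pats : List String) (fb : Option String)
    (l : List (String × List String)) :
    pvLoopB pats fb l =
      match pvLoopA1 pats l with
      | some s => some s
      | none => match fb with
                | some x => some x
                | none => pvLoopA2 l := by
  induction l generalizing fb with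
  | nil => cases fb <;> rfl
  | cons h rest ih =>
    obtain ⟨symbol, parts⟩ := h
    simp only [pvLoopB, pvLoopA1, pvLoopA2, pvInnerA_eq_any]
    by_cases hp : (pats.any fun p =>
        PySem.Str.isIn p (PySem.Str.lower (PySem.Str.join " " parts))) = true
    · simp only [hp, if_true]
    · simp only [hp, if_false, Bool.false_eq_true]
      rw [ih]
      cases fb with
      | some x => rfl
      | none =>
        by_cases hc :
            PySem.Str.isIn "count" (PySem.Str.lower (PySem.Str.join " " parts)) = true
        · simp only [Option.isNone_none, Bool.true_and, hc, if_true]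
        · simp only [Option.isNone_none, Bool.true_and, hc, if_false, Bool.false_eq_true]

-- ===== VERDICT (by name: the statement is the Claim_ definition above) =====
theorem identify_signal_spec : Claim_equal_identify_signal := by
  intro signal_names is_trusted _
  unfold Spec_identify_signal identify_signal identify_signal_alt
  rw [pvLoopB_eq]
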